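-- pv_equiv track=rewrite | github.com/seoiiwon/Algorithm | 백준/Bronze/8958. OX퀴즈/OX퀴즈.py | oxQuizPoint
-- ===== SOURCE A (Python) =====
-- def oxQuizPoint(oxResult):
--     beforeResult = 0
--     point = 0
--     for result in range(len(oxResult)):
--         if oxResult[result] == 'O':
--             if beforeResult == 0:
--                 point += 1
--                 beforeResult = 1
--             else:
--                 point += beforeResult + 1
--                 beforeResult += 1
--         else:
--             beforeResult = 0
--     return point
-- ===== SOURCE B (Python) =====
-- def oxQuizPoint(oxResult):
--     total = 0
--     i = 0
--     n = len(oxResult)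
--     while i < n:
--         if oxResult[i] == 'O':
--             j = i
--             while j < n and oxResult[j] == 'O':
--                 j += 1
--             k = j - i
--             total += k * (k + 1) // 2
--             i = j
--         else:
--             i += 1
--     return total
-- ===== Notes on version B (the rewrite author's own statement) =====
-- stated objective: alternative
-- what changed: Replaces the per-character incremental streak counter with a run-length scan: each maximal run of k 'O's contributes the closed-form triangular value k*(k+1)//2.
import Mathlib
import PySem

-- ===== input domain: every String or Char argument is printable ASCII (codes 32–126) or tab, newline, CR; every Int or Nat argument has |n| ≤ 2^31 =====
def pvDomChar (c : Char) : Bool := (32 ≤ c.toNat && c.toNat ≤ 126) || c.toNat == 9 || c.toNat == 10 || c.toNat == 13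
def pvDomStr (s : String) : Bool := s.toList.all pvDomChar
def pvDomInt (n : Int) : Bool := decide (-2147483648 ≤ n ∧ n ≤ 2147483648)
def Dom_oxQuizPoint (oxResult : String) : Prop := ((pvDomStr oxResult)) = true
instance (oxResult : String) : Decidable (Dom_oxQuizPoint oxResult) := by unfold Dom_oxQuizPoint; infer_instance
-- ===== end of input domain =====

-- B replaces A's incremental streak counter with a run-length scan plus the closed-form
-- triangular value per run of 'O's; same cost, alternative algorithm.

-- ===== PORT A =====
-- A's loop over indices 0..len-1 with in-range access oxResult[result], as a fold over the
-- characters carrying (beforeResult, point); branch order as in A.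
def oxQuizPoint (oxResult : String) : Int :=
  (oxResult.toList.foldl
    (fun (st : Int × Int) c =>
      if c = 'O' then
        if st.1 = 0 then (1, st.2 + 1)
        else (st.1 + 1, st.2 + st.1 + 1)
      else (0, st.2))
    (0, 0)).2

-- ===== PORT B =====
-- inner while loop of Source B: count the leading run of 'O's, return (run length, rest)
def pvRunO : List Char → Nat × List Char
  | [] => (0, [])
  | c :: cs => if c = 'O' then let p := pvRunO cs; (p.1 + 1, p.2) else (0, c :: cs)

theorem pvRunO_len : ∀ cs : List Char, (pvRunO cs).2.length ≤ cs.length := by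
  intro cs
  induction cs with
  | nil => simp [pvRunO]
  | cons c cs ih =>
    by_cases h : c = 'O' <;> simp [pvRunO, h] <;> try omega

-- outer while loop of Source B: per maximal 'O'-run of length k add k*(k+1)//2
def pvAltGo : List Char → Int
  | [] => 0
  | c :: cs =>
    if c = 'O' then
      let p := pvRunO cs
      let k : Int := (p.1 : Int) + 1
      PySem.Int.floordiv (k * (k + 1)) 2 + pvAltGo p.2
    else pvAltGo cs
termination_by cs => cs.length
decreasing_by
  · have := pvRunO_len cs; simp; omega
  · simp

def oxQuizPoint_alt (oxResult : String) : Int := pvAltGo oxResult.toList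

-- ===== PRECONDITION & SPEC =====
def Spec_oxQuizPoint (oxResult : String) (out : Int) : Prop := out = oxQuizPoint_alt oxResult
instance (oxResult : String) (out : Int) : Decidable (Spec_oxQuizPoint oxResult out) := by unfold Spec_oxQuizPoint; infer_instance

-- ===== CLAIM (what is proved, stated in full; the proofs are below) =====
def Claim_equal_oxQuizPoint : Prop := ∀ (oxResult : String), Dom_oxQuizPoint oxResult → Spec_oxQuizPoint oxResult (oxQuizPoint oxResult)

-- ===== LEMMAS AND PROOFS =====

-- reference function: remaining points added when the current streak is b
def pvG (b : Int) : List Char → Int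
  | [] => 0
  | c :: cs => if c = 'O' then (b + 1) + pvG (b + 1) cs else pvG 0 cs

-- triangular numbers
def pvTri : Nat → Int
  | 0 => 0
  | k + 1 => pvTri k + (k : Int) + 1

theorem pvTri_two_mul : ∀ k : Nat, 2 * pvTri k = (k : Int) * ((k : Int) + 1) := by
  intro k
  induction k with
  | zero => simp [pvTri]
  | succ k ih => simp [pvTri]; linarith

theorem pvTri_floordiv (k : Nat) :
    PySem.Int.floordiv ((k : Int) * ((k : Int) + 1)) 2 = pvTri k := by
  rw [← pvTri_two_mul, PySem.Int.floordiv_eq_ediv_of_pos (by omega : (0:Int) < 2)]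
  omega

-- A's fold from any state (b, p) with 0 ≤ b
theorem pvFoldA (cs : List Char) : ∀ b p : Int, 0 ≤ b →
    (cs.foldl
      (fun (st : Int × Int) c =>
        if c = 'O' then
          if st.1 = 0 then (1, st.2 + 1)
          else (st.1 + 1, st.2 + st.1 + 1)
        else (0, st.2))
      (b, p)).2 = p + pvG b cs := by
  induction cs with
  | nil => intro b p hb; simp [pvG]
  | cons c cs ih =>
    intro b p hb
    by_cases h : c = 'O'
    · by_cases hb0 : b = 0
      · subst hb0
        simp [List.foldl, h, pvG, ih 1 (p + 1) (by omega)]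
        ring
      · simp [List.foldl, h, hb0, pvG, ih (b + 1) (p + b + 1) (by omega)]
        ring
    · simp [List.foldl, h, pvG, ih 0 p (by omega)]

-- pvG through a leading run of 'O's
theorem pvG_run : ∀ (cs : List Char) (b : Int),
    pvG b cs = ((pvRunO cs).1 : Int) * b + pvTri (pvRunO cs).1 + pvG 0 (pvRunO cs).2 := by
  intro cs
  induction cs with
  | nil => intro b; simp [pvRunO, pvG, pvTri]
  | cons c cs ih =>
    intro b
    by_cases h : c = 'O'
    · simp only [pvG, pvRunO, h, if_pos]
      rw [ih (b + 1)]
      simp [pvTri]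
      ring
    · simp [pvG, pvRunO, h, pvTri]

-- B's run-length scan equals the reference
theorem pvAlt_eq_G : ∀ (n : Nat) (cs : List Char), cs.length ≤ n → pvAltGo cs = pvG 0 cs := by
  intro n
  induction n with
  | zero =>
    intro cs h
    have : cs = [] := by cases cs <;> simp_all
    subst this; simp [pvAltGo, pvG]
  | succ n ih =>
    intro cs h
    cases cs with
    | nil => simp [pvAltGo, pvG]
    | cons c cs =>
      by_cases hc : c = 'O'
      · subst hc
        have hr := pvRunO_len cs
        rw [pvG_run ('O' :: cs) 0]
        simp only [pvAltGo, pvRunO, if_pos]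
        rw [ih (pvRunO cs).2 (by simp at h; omega)]
        have hk := pvTri_floordiv ((pvRunO cs).1 + 1)
        push_cast at hk ⊢
        rw [hk]
        ring
      · simp only [pvAltGo, pvG, hc, ite_false]
        exact ih cs (by simp at h; omega)

-- ===== VERDICT (by name: the statement is the Claim_ definition above) =====
theorem oxQuizPoint_spec : Claim_equal_oxQuizPoint := by
  intro s _
  unfold Spec_oxQuizPoint oxQuizPoint oxQuizPoint_alt
  rw [pvFoldA s.toList 0 0 (by omega), pvAlt_eq_G s.toList.length s.toList le_rfl]
  simp
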